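-- pv_equiv track=rewrite | github.com/MrBrantCode/unitest_baseline | mut_generate/mist_train_cf/cf_82546/solution.py | number_of_outcomes
-- ===== SOURCE A (Python) =====
-- def number_of_outcomes(n):
--     """
--     Calculate the total number of possible final outcomes in a tournament scenario with n teams.
--
--     Parameters:
--     n (int): The number of teams.
--
--     Returns:
--     int: The total number of possible final outcomes modulo 10^9 + 7.
--     """
--     mod = 10**9 + 7
--
--     def choose(n, k):
--         """
--         Calculate binomial coefficients using Pascal's triangle approach.
--
--         Parameters:
--         n (int): The total number of items.
--         k (int): The number of items to choose.
--
--         Returns: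
--         int: The binomial coefficient modulo 10^9 + 7.
--         """
--         if k > n:
--             return 0
--         if k > n // 2:
--             k = n - k
--         x = 1
--         y = 1
--         for i in range(1, k + 1):
--             x = (x * (n + 1 - i)) % mod
--             y = (y * i) % mod
--         return (x * pow(y, mod - 2, mod)) % mod
--
--     F = [0] * (n + 1)
--     F[0] = 1
--
--     for i in range(1, n + 1):
--         for j in range(i * (i - 1) // 2, -1, -1):
--             if F[i] == 0:
--                 F[i] = F[i - 1]
--             else:
--                 F[i] = (F[i] + choose(i * (i - 1) // 2, j) * (F[i - 1] ** ((i * (i - 1)) // 2 - j) % mod) * ((2 * i - 1) ** j) % mod) % mod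
--
--     return F[n]
-- ===== SOURCE B (Python) =====
-- def number_of_outcomes(n):
--     """
--     Calculate the total number of possible final outcomes in a tournament scenario with n teams.
--
--     Same DP as the original, but each round's binomial coefficients are taken from a
--     prefix-product table built once per round, the powers of the two bases are kept as
--     incrementally updated modular values, and no huge plain-integer powers are formed.
--     """
--     mod = 10**9 + 7
--     f = 1
--     for i in range(1, n + 1):
--         m = i * (i - 1) // 2
--         h = m // 2
--         b = (2 * i - 1) % mod
--         # coefficient table: cs[k] = falling-factorial(m, k) * pow(k!, mod-2, mod) % mod
--         cs = []
--         ff = 1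
--         fact = 1
--         for k in range(0, h + 1):
--             if k > 0:
--                 ff = ff * ((m + 1 - k) % mod) % mod
--                 fact = fact * (k % mod) % mod
--             cs.append(ff * pow(fact, mod - 2, mod) % mod)
--         # powers of b modulo mod: pb[t] = b**t % mod
--         pb = [1]
--         for t in range(1, m + 1):
--             pb.append(pb[-1] * b % mod)
--         acc = 0
--         pf = 1  # f**(m-j) % mod, updated as j descends
--         for j in range(m, -1, -1):
--             if acc == 0:
--                 acc = f
--             else:
--                 c = cs[j] if j <= h else cs[m - j]
--                 acc = (acc + c * pf * pb[j]) % mod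
--             if j > 0:
--                 pf = pf * f % mod
--         f = acc
--     return f
-- ===== Notes on version B (the rewrite author's own statement) =====
-- stated objective: faster
-- what changed: B keeps the same DP recurrence and descending accumulation but replaces A's per-term from-scratch work (a fresh Pascal/Fermat choose loop per term and huge plain-integer powers) with a per-round prefix-product coefficient table built once plus incrementally maintained modular powers, so every inner step costs a constant number of modular multiplications; intended as faster — a timing run measured ~46x at the largest size on which A still answered, while both share the cubic-size inner loop and time out beyond it.
import Mathlib
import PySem

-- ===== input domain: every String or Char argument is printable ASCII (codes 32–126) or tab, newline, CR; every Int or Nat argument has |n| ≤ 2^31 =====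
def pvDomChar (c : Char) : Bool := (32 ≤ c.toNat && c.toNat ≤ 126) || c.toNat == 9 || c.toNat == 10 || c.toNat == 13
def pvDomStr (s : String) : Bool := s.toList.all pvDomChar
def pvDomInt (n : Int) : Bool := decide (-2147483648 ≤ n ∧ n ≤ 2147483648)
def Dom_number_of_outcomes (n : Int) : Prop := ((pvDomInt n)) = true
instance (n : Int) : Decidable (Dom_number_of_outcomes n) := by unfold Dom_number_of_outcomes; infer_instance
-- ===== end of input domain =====

-- B replaces A's per-term from-scratch work (a fresh Pascal/Fermat `choose` loop and huge plain-integer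
-- powers for every j) by per-round prefix-product tables and incrementally maintained modular powers;
-- same DP values; intended as faster (a timing run measured it ~46x at the largest size on which A
-- still answered; both versions share the cubic-size inner loop, so both time out far beyond that).

-- ===== PORT A =====
def pvMod : Int := 10 ^ 9 + 7

-- Python's three-argument pow(b, e, m), ported by hand as binary exponentiation: exact for e >= 0 and
-- m > 0 (the value is b^e mod m, in [0, m)); the prelude's PySem.Int.powMod forms the full power b^e
-- first, which is infeasible to execute for the exponent 10^9+5 both programs use.
def pvPowMod (b : Int) (e : Nat) (m : Int) : Int :=
  if e = 0 then PySem.Int.mod 1 m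
  else
    let r := pvPowMod b (e / 2) m
    if e % 2 = 0 then PySem.Int.mod (r * r) m
    else PySem.Int.mod (PySem.Int.mod (r * r) m * b) m
termination_by e
decreasing_by omega

-- A's nested helper `choose`; pow(y, mod-2, mod) is ported via pvPowMod above
def pvChooseA (n k : Int) : Int :=
  if k > n then 0
  else
    let k := if k > PySem.Int.floordiv n 2 then n - k else k
    let xy := (PySem.List.pyRange 1 (k + 1) 1).foldl
      (fun (xy : Int × Int) i =>
        (PySem.Int.mod (xy.1 * (n + 1 - i)) pvMod, PySem.Int.mod (xy.2 * i) pvMod)) ((1 : Int), (1 : Int))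
    PySem.Int.mod (xy.1 * pvPowMod xy.2 (pvMod - 2).toNat pvMod) pvMod

-- body of A's inner j-loop (updates the DP list at index i)
def pvStepA (i : Int) (F : List Int) (j : Int) : List Int :=
  let m := PySem.Int.floordiv (i * (i - 1)) 2
  if PySem.List.pyGetD F i 0 = 0 then
    PySem.List.pySetD F i (PySem.List.pyGetD F (i - 1) 0)
  else
    PySem.List.pySetD F i
      (PySem.Int.mod
        (PySem.List.pyGetD F i 0 +
          PySem.Int.mod
            (pvChooseA m j *
              PySem.Int.mod (PySem.List.pyGetD F (i - 1) 0 ^ (m - j).toNat) pvMod *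
              (2 * i - 1) ^ j.toNat) pvMod) pvMod)

def number_of_outcomes (n : Int) : Int :=
  let F0 := PySem.List.pySetD (List.replicate (n + 1).toNat 0) 0 1
  let F := (PySem.List.pyRange 1 (n + 1) 1).foldl
    (fun F i =>
      (PySem.List.pyRange (PySem.Int.floordiv (i * (i - 1)) 2) (-1) (-1)).foldl (pvStepA i) F) F0
  PySem.List.pyGetD F n 0

-- ===== PORT B =====
-- one round of B's loop: coefficient table, modular power table, then the descending accumulation
def pvRoundB (i f : Int) : Int :=
  let m := PySem.Int.floordiv (i * (i - 1)) 2
  let h := PySem.Int.floordiv m 2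
  let b := PySem.Int.mod (2 * i - 1) pvMod
  let cs := ((PySem.List.pyRange 0 (h + 1) 1).foldl
    (fun (s : List Int × Int × Int) k =>
      let ff := if 0 < k then PySem.Int.mod (s.2.1 * PySem.Int.mod (m + 1 - k) pvMod) pvMod else s.2.1
      let fact := if 0 < k then PySem.Int.mod (s.2.2 * PySem.Int.mod k pvMod) pvMod else s.2.2
      (s.1 ++ [PySem.Int.mod (ff * pvPowMod fact (pvMod - 2).toNat pvMod) pvMod], ff, fact))
    (([] : List Int), (1 : Int), (1 : Int))).1
  let pb := (PySem.List.pyRange 1 (m + 1) 1).foldl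
    (fun pb _ => pb ++ [PySem.Int.mod (PySem.List.pyGetD pb (-1) 0 * b) pvMod]) [(1 : Int)]
  ((PySem.List.pyRange m (-1) (-1)).foldl
    (fun (s : Int × Int) j =>
      (if s.1 = 0 then f
       else
         PySem.Int.mod
           (s.1 + (if j ≤ h then PySem.List.pyGetD cs j 0 else PySem.List.pyGetD cs (m - j) 0) * s.2 *
              PySem.List.pyGetD pb j 0) pvMod,
       if 0 < j then PySem.Int.mod (s.2 * f) pvMod else s.2)) ((0 : Int), (1 : Int))).1

def number_of_outcomes_alt (n : Int) : Int :=
  (PySem.List.pyRange 1 (n + 1) 1).foldl (fun f i => pvRoundB i f) 1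

-- ===== PRECONDITION & SPEC =====
-- Pre_ excludes negative n, where the Python A raises IndexError (its DP list is built empty there,
-- so its very first write fails); B is not claimed on those inputs.
def Pre_number_of_outcomes (n : Int) : Prop := 0 ≤ n
instance (n : Int) : Decidable (Pre_number_of_outcomes n) := by unfold Pre_number_of_outcomes; infer_instance
def pvWitness_number_of_outcomes : Int := 3

def Spec_number_of_outcomes (n : Int) (out : Int) : Prop := out = number_of_outcomes_alt n
instance (n : Int) (out : Int) : Decidable (Spec_number_of_outcomes n out) := by unfold Spec_number_of_outcomes; infer_instance

-- ===== CLAIM (what is proved, stated in full; the proofs are below) =====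
def Claim_equal_number_of_outcomes : Prop := ∀ (n : Int), Dom_number_of_outcomes n → Pre_number_of_outcomes n → Spec_number_of_outcomes n (number_of_outcomes n)
-- ===== LEMMAS AND PROOFS =====

lemma pvMod_pos : (0 : Int) < pvMod := by norm_num [pvMod]

lemma pmod (a : Int) : PySem.Int.mod a pvMod = a % pvMod :=
  PySem.Int.mod_eq_emod_of_pos pvMod_pos

lemma pv_mul_mod_right (c r : Int) : c * r % pvMod = c * (r % pvMod) % pvMod := by
  conv_lhs => rw [Int.mul_emod]
  conv_rhs => rw [Int.mul_emod, Int.emod_emod_of_dvd _ dvd_rfl]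

lemma pv_mul_mod_left (c r : Int) : c % pvMod * r % pvMod = c * r % pvMod := by
  conv_rhs => rw [Int.mul_emod]
  conv_lhs => rw [Int.mul_emod, Int.emod_emod_of_dvd _ dvd_rfl]

lemma pv_add_mod_right (a b : Int) : (a + b % pvMod) % pvMod = (a + b) % pvMod := by
  conv_lhs => rw [Int.add_emod, Int.emod_emod_of_dvd _ dvd_rfl]
  conv_rhs => rw [Int.add_emod]

-- running values of B's coefficient loop / A's choose loop
def pvFF (m : Int) : Nat → Int
  | 0 => 1
  | k + 1 => pvFF m k * ((m - k) % pvMod) % pvMod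
def pvFact : Nat → Int
  | 0 => 1
  | k + 1 => pvFact k * (((k : Int) + 1) % pvMod) % pvMod
def pvCf (m : Int) (k : Nat) : Int :=
  pvFF m k * pvPowMod (pvFact k) (pvMod - 2).toNat pvMod % pvMod
def pvPB (b : Int) : Nat → Int
  | 0 => 1
  | t + 1 => pvPB b t * b % pvMod

-- scalar form of A's inner step
def pvSStepA (i m f acc j : Int) : Int :=
  if acc = 0 then f
  else (acc + pvChooseA m j * (f ^ (m - j).toNat % pvMod) * (2 * i - 1) ^ j.toNat % pvMod) % pvMod

-- B's inner step, with the tables abstracted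
def pvStepB (f m h : Int) (cs pb : List Int) (s : Int × Int) (j : Int) : Int × Int :=
  (if s.1 = 0 then f
   else (s.1 + (if j ≤ h then PySem.List.pyGetD cs j 0 else PySem.List.pyGetD cs (m - j) 0) * s.2 *
      PySem.List.pyGetD pb j 0) % pvMod,
   if 0 < j then s.2 * f % pvMod else s.2)

lemma pvChooseA_fold (m : Int) (K : Nat) :
    (PySem.List.pyRange 1 ((K : Int) + 1) 1).foldl
      (fun (xy : Int × Int) i => (xy.1 * (m + 1 - i) % pvMod, xy.2 * i % pvMod)) ((1 : Int), (1 : Int))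
    = (pvFF m K, pvFact K) := by
  induction K with
  | zero =>
      rw [show ((0 : Nat) : Int) + 1 = 1 by norm_num, PySem.List.pyRange_one_eq_nil (le_refl 1)]
      simp [pvFF, pvFact]
  | succ K ih =>
      rw [show (((K + 1 : Nat)) : Int) + 1 = ((K : Int) + 1) + 1 by push_cast; ring,
        PySem.List.pyRange_one_succ_right (by omega), List.foldl_append, ih]
      simp only [List.foldl]
      refine Prod.ext ?_ ?_
      · show pvFF m K * (m + 1 - ((K : Int) + 1)) % pvMod = pvFF m (K + 1)
        rw [show m + 1 - ((K : Int) + 1) = m - K by ring, pvFF, pv_mul_mod_right]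
      · show pvFact K * ((K : Int) + 1) % pvMod = pvFact (K + 1)
        rw [pvFact, pv_mul_mod_right]

lemma pvChooseA_eq (m j : Int) (hj0 : 0 ≤ j) (hjm : j ≤ m) :
    pvChooseA m j = pvCf m (if j ≤ PySem.Int.floordiv m 2 then j.toNat else (m - j).toNat) := by
  simp only [pvChooseA, pmod]
  rw [if_neg (not_lt.mpr hjm)]
  by_cases hc : j ≤ PySem.Int.floordiv m 2
  · rw [if_neg (not_lt.mpr hc), if_pos hc]
    rw [show j + 1 = ((j.toNat : Int)) + 1 by rw [Int.toNat_of_nonneg hj0]]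
    rw [pvChooseA_fold]
    rfl
  · rw [if_pos (not_le.mp hc), if_neg hc]
    rw [show m - j + 1 = (((m - j).toNat : Int)) + 1 by rw [Int.toNat_of_nonneg (by omega)]]
    rw [pvChooseA_fold]
    rfl

lemma pvCs_fold (m : Int) (hN : Nat) :
    (PySem.List.pyRange 0 ((hN : Int) + 1) 1).foldl
      (fun (s : List Int × Int × Int) k =>
        (s.1 ++ [(if 0 < k then s.2.1 * ((m + 1 - k) % pvMod) % pvMod else s.2.1) *
            pvPowMod (if 0 < k then s.2.2 * (k % pvMod) % pvMod else s.2.2) (pvMod - 2).toNat pvMod %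
              pvMod],
         if 0 < k then s.2.1 * ((m + 1 - k) % pvMod) % pvMod else s.2.1,
         if 0 < k then s.2.2 * (k % pvMod) % pvMod else s.2.2))
      (([] : List Int), (1 : Int), (1 : Int))
    = ((List.range (hN + 1)).map (pvCf m), pvFF m hN, pvFact hN) := by
  induction hN with
  | zero =>
      rw [show ((0 : Nat) : Int) + 1 = 0 + 1 by norm_num, PySem.List.pyRange_one_singleton]
      simp [pvCf, pvFF, pvFact]
  | succ K ih =>
      rw [show (((K + 1 : Nat)) : Int) + 1 = ((K : Int) + 1) + 1 by push_cast; ring,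
        PySem.List.pyRange_one_succ_right (by omega), List.foldl_append, ih]
      simp only [List.foldl]
      have h3 : (0 : Int) < (K : Int) + 1 := by omega
      simp only [h3, ite_true]
      have hff : pvFF m K * ((m + 1 - ((K : Int) + 1)) % pvMod) % pvMod = pvFF m (K + 1) := by
        rw [show m + 1 - ((K : Int) + 1) = m - K by ring, pvFF]
      have hfa : pvFact K * (((K : Int) + 1) % pvMod) % pvMod = pvFact (K + 1) := by
        rw [pvFact]
      rw [hff, hfa]
      simp [List.range_succ, pvCf]

lemma pvPb_fold (b : Int) (mN : Nat) :
    (PySem.List.pyRange 1 ((mN : Int) + 1) 1).foldl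
      (fun pb _ => pb ++ [PySem.List.pyGetD pb (-1) 0 * b % pvMod]) [(1 : Int)]
    = (List.range (mN + 1)).map (pvPB b) := by
  induction mN with
  | zero =>
      rw [show ((0 : Nat) : Int) + 1 = 1 by norm_num, PySem.List.pyRange_one_eq_nil (le_refl 1)]
      simp [pvPB]
  | succ K ih =>
      rw [show (((K + 1 : Nat)) : Int) + 1 = ((K : Int) + 1) + 1 by push_cast; ring,
        PySem.List.pyRange_one_succ_right (by omega), List.foldl_append, ih]
      simp only [List.foldl]
      rw [List.range_succ (n := K + 1), List.map_append,
        show (List.range (K + 1)).map (pvPB b) = (List.range K).map (pvPB b) ++ [pvPB b K] by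
          rw [List.range_succ, List.map_append]; rfl,
        PySem.List.pyGetD_neg_one_append_singleton]
      simp [pvPB]

lemma pvPB_eq (i : Int) (t : Nat) : pvPB ((2 * i - 1) % pvMod) t = (2 * i - 1) ^ t % pvMod := by
  induction t with
  | zero => show (1 : Int) = (2 * i - 1) ^ 0 % pvMod; norm_num [pvMod]
  | succ t ih =>
      rw [pvPB, ih, pow_succ]
      conv_rhs => rw [Int.mul_emod]

-- one inner step of B equals one scalar step of A
lemma pvStep_eq (i f : Int) (mN hN : Nat) (hh : (hN : Int) = PySem.Int.floordiv (mN : Int) 2)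
    (jN : Nat) (hj : jN ≤ mN) (acc : Int) :
    pvStepB f (mN : Int) (hN : Int) ((List.range (hN + 1)).map (pvCf (mN : Int)))
      ((List.range (mN + 1)).map (pvPB ((2 * i - 1) % pvMod)))
      (acc, f ^ (mN - jN) % pvMod) (jN : Int)
    = (pvSStepA i (mN : Int) f acc (jN : Int),
       f ^ (mN - jN + (if 0 < jN then 1 else 0)) % pvMod) := by
  have h2 : PySem.Int.floordiv ((mN : Nat) : Int) 2 = ((mN / 2 : Nat) : Int) := by
    exact_mod_cast PySem.Int.floordiv_natCast mN 2
  have hmn : hN = mN / 2 := by exact_mod_cast hh.trans h2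
  have hget : ∀ (g : Nat → Int) (n k : Nat), k < n → ((List.range n).map g).getD k 0 = g k := by
    intro g n k hk
    rw [List.getD_eq_getElem?_getD]
    simp [hk]
  unfold pvStepB pvSStepA
  dsimp only
  refine Prod.ext ?_ ?_
  · by_cases hz : acc = 0
    · rw [if_pos hz, if_pos hz]
    rw [if_neg hz, if_neg hz,
      pvChooseA_eq (mN : Int) (jN : Int) (by omega) (by exact_mod_cast hj), ← hh,
      show ((mN : Int) - (jN : Int)) = (((mN - jN : Nat)) : Int) by omega,
      Int.toNat_natCast, Int.toNat_natCast]
    by_cases hc : (jN : Int) ≤ (hN : Int)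
    · have hcN : jN ≤ hN := by exact_mod_cast hc
      rw [if_pos hc, if_pos hc, PySem.List.pyGetD_natCast, PySem.List.pyGetD_natCast,
        hget _ _ jN (by omega), hget _ _ jN (by omega), pvPB_eq]
      generalize pvCf (mN : Int) jN * (f ^ (mN - jN) % pvMod) = c
      rw [← pv_add_mod_right acc (c * ((2 * i - 1) ^ jN % pvMod)), ← pv_mul_mod_right,
        pv_add_mod_right]
    · have hcN : ¬ jN ≤ hN := fun h => hc (by exact_mod_cast h)
      rw [if_neg hc, if_neg hc, PySem.List.pyGetD_natCast, PySem.List.pyGetD_natCast,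
        hget _ _ (mN - jN) (by omega), hget _ _ jN (by omega), pvPB_eq]
      generalize pvCf (mN : Int) (mN - jN) * (f ^ (mN - jN) % pvMod) = c
      rw [← pv_add_mod_right acc (c * ((2 * i - 1) ^ jN % pvMod)), ← pv_mul_mod_right,
        pv_add_mod_right]
  · rcases Nat.eq_zero_or_pos jN with h0 | hpos
    · subst h0; simp
    · rw [if_pos (by exact_mod_cast hpos : (0 : Int) < (jN : Int)), if_pos hpos,
        pv_mul_mod_left, ← pow_succ]

lemma pvInner_loop (i f : Int) (mN hN : Nat) (hh : (hN : Int) = PySem.Int.floordiv (mN : Int) 2) :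
    ∀ (jN : Nat), jN ≤ mN → ∀ acc : Int,
    (PySem.List.pyRange (jN : Int) (-1) (-1)).foldl
      (pvStepB f (mN : Int) (hN : Int) ((List.range (hN + 1)).map (pvCf (mN : Int)))
        ((List.range (mN + 1)).map (pvPB ((2 * i - 1) % pvMod))))
      (acc, f ^ (mN - jN) % pvMod)
    = ((PySem.List.pyRange (jN : Int) (-1) (-1)).foldl (pvSStepA i (mN : Int) f) acc,
       f ^ mN % pvMod) := by
  intro jN
  induction jN with
  | zero =>
      intro _ acc
      rw [PySem.List.pyRange_neg_one_cons (by omega : (-1 : Int) < ((0 : Nat) : Int)),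
        show (((0 : Nat) : Int)) - 1 = -1 by norm_num,
        PySem.List.pyRange_neg_one_eq_nil (le_refl (-1 : Int))]
      simp only [List.foldl]
      rw [pvStep_eq i f mN hN hh 0 (Nat.zero_le _) acc]
      simp
  | succ jN ih =>
      intro hj acc
      rw [show (((jN + 1 : Nat)) : Int) = ((jN : Int) + 1) by push_cast; ring,
        PySem.List.pyRange_neg_one_cons (by omega : (-1 : Int) < (jN : Int) + 1),
        show ((jN : Int) + 1) - 1 = (jN : Int) by ring]
      simp only [List.foldl]
      rw [show ((jN : Int) + 1) = (((jN + 1 : Nat)) : Int) by push_cast; ring,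
        pvStep_eq i f mN hN hh (jN + 1) hj acc,
        if_pos (Nat.succ_pos jN),
        show mN - (jN + 1) + 1 = mN - jN by omega]
      exact ih (by omega) _

-- B's round body in scalar-step form
lemma pvRoundB_eq (i f : Int) (hi : 1 ≤ i) :
    pvRoundB i f
    = (PySem.List.pyRange (PySem.Int.floordiv (i * (i - 1)) 2) (-1) (-1)).foldl
        (pvSStepA i (PySem.Int.floordiv (i * (i - 1)) 2) f) 0 := by
  have hm0 : 0 ≤ PySem.Int.floordiv (i * (i - 1)) 2 := by
    rw [PySem.Int.floordiv_eq_ediv_of_pos (by norm_num)]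
    exact Int.ediv_nonneg (by nlinarith) (by norm_num)
  simp only [pvRoundB, pmod]
  rw [show PySem.Int.floordiv (i * (i - 1)) 2
      = (((PySem.Int.floordiv (i * (i - 1)) 2).toNat : Nat) : Int) from
      (Int.toNat_of_nonneg hm0).symm]
  generalize (PySem.Int.floordiv (i * (i - 1)) 2).toNat = mN
  rw [show PySem.Int.floordiv ((mN : Nat) : Int) 2 = (((mN / 2 : Nat)) : Int) by
      exact_mod_cast PySem.Int.floordiv_natCast mN 2]
  rw [pvCs_fold ((mN : Nat) : Int) (mN / 2), pvPb_fold ((2 * i - 1) % pvMod) mN]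
  show ((PySem.List.pyRange ((mN : Nat) : Int) (-1) (-1)).foldl
      (pvStepB f ((mN : Nat) : Int) (((mN / 2 : Nat)) : Int)
        ((List.range (mN / 2 + 1)).map (pvCf ((mN : Nat) : Int)))
        ((List.range (mN + 1)).map (pvPB ((2 * i - 1) % pvMod)))) ((0 : Int), (1 : Int))).1 = _
  rw [show ((0 : Int), (1 : Int)) = ((0 : Int), f ^ (mN - mN) % pvMod) by
      rw [Nat.sub_self, pow_zero]; norm_num [pvMod]]
  rw [pvInner_loop i f mN (mN / 2)
      (by exact_mod_cast (PySem.Int.floordiv_natCast mN 2).symm) mN (le_refl mN) 0]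

-- A's inner loop only rewrites index i, so it factors through the scalar fold
lemma pvListFact (i : Int) (hi : 1 ≤ i) (js : List Int) :
    ∀ (F : List Int), i < (F.length : Int) →
    js.foldl (pvStepA i) F
    = PySem.List.pySetD F i
        (js.foldl (pvSStepA i (PySem.Int.floordiv (i * (i - 1)) 2) (PySem.List.pyGetD F (i - 1) 0))
          (PySem.List.pyGetD F i 0)) := by
  induction js with
  | nil =>
      intro F hF
      show F = PySem.List.pySetD F i (PySem.List.pyGetD F i 0)
      rw [PySem.List.pySetD_of_nonneg _ _ (by omega),
        PySem.List.pyGetD_eq_getElem _ _ (by omega) hF]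
      exact (List.set_getElem_self (by omega)).symm
  | cons j js ih =>
      intro F hF
      have hil : i.toNat < F.length := by omega
      have hne : i.toNat ≠ (i - 1).toNat := by omega
      have hstep : pvStepA i F j
          = PySem.List.pySetD F i
              (pvSStepA i (PySem.Int.floordiv (i * (i - 1)) 2) (PySem.List.pyGetD F (i - 1) 0)
                (PySem.List.pyGetD F i 0) j) := by
        simp only [pvStepA, pvSStepA, pmod]
        by_cases hz : PySem.List.pyGetD F i 0 = 0
        · rw [if_pos hz, if_pos hz]
        · rw [if_neg hz, if_neg hz]
      set v := pvSStepA i (PySem.Int.floordiv (i * (i - 1)) 2) (PySem.List.pyGetD F (i - 1) 0)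
        (PySem.List.pyGetD F i 0) j with hv
      have h1 : PySem.List.pySetD F i v = F.set i.toNat v :=
        PySem.List.pySetD_of_nonneg _ _ (by omega)
      have h2 : PySem.List.pyGetD (F.set i.toNat v) i 0 = v := by
        rw [PySem.List.pyGetD_eq_getElem _ _ (by omega) (by simpa using hF)]
        exact List.getElem_set_self (by simpa using hil)
      have h3 : PySem.List.pyGetD (F.set i.toNat v) (i - 1) 0 = PySem.List.pyGetD F (i - 1) 0 := by
        rw [PySem.List.pyGetD_eq_getElem _ _ (by omega) (by simp only [List.length_set]; omega),
          PySem.List.pyGetD_eq_getElem _ _ (by omega) (by omega : i - 1 < (F.length : Int)),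
          List.getElem_set_ne (by omega)]
      rw [List.foldl_cons, hstep, h1, ih _ (by simpa using hF), h2, h3,
        PySem.List.pySetD_of_nonneg _ _ (by omega : (0 : Int) ≤ i),
        PySem.List.pySetD_of_nonneg _ _ (by omega : (0 : Int) ≤ i), List.set_set]
      rfl

-- the scalar outer sequence (B's rounds)
def pvSB : Nat → Int
  | 0 => 1
  | K + 1 => pvRoundB ((K : Int) + 1) (pvSB K)

lemma pvAlt_fold (K : Nat) :
    (PySem.List.pyRange 1 ((K : Int) + 1) 1).foldl (fun f i => pvRoundB i f) 1 = pvSB K := by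
  induction K with
  | zero =>
      rw [show ((0 : Nat) : Int) + 1 = 1 by norm_num, PySem.List.pyRange_one_eq_nil (le_refl 1)]
      rfl
  | succ K ih =>
      rw [show (((K + 1 : Nat)) : Int) + 1 = ((K : Int) + 1) + 1 by push_cast; ring,
        PySem.List.pyRange_one_succ_right (by omega), List.foldl_append, ih]
      rfl

lemma pvA_outer (nN : Nat) :
    ∀ (K : Nat), K ≤ nN →
    ∀ L, L = (PySem.List.pyRange 1 ((K : Int) + 1) 1).foldl
        (fun F i =>
          (PySem.List.pyRange (PySem.Int.floordiv (i * (i - 1)) 2) (-1) (-1)).foldl (pvStepA i) F)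
        (PySem.List.pySetD (List.replicate (((nN : Int) + 1)).toNat 0) 0 1) →
      L.length = nN + 1 ∧ (∀ t : Nat, K < t → L.getD t 0 = 0) ∧ L.getD K 0 = pvSB K := by
  intro K
  induction K with
  | zero =>
      intro _ L hL
      rw [show ((0 : Nat) : Int) + 1 = 1 by norm_num,
        PySem.List.pyRange_one_eq_nil (le_refl 1)] at hL
      simp only [List.foldl] at hL
      rw [PySem.List.pySetD_of_nonneg _ _ (by omega)] at hL
      simp only [Int.toNat_zero] at hL
      subst hL
      have hlen : ((nN : Int) + 1).toNat = nN + 1 := by omega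
      refine ⟨by simp [hlen], ?_, ?_⟩
      · intro t ht
        rw [List.getD_eq_getElem?_getD, List.getElem?_set_ne (by omega)]
        simp [List.getElem?_replicate]
        split <;> rfl
      · rw [List.getD_eq_getElem?_getD, List.getElem?_set_self (by simp [hlen])]
        rfl
  | succ K ihK =>
      intro hK L hL
      rw [show (((K + 1 : Nat)) : Int) + 1 = ((K : Int) + 1) + 1 by push_cast; ring,
        PySem.List.pyRange_one_succ_right (by omega), List.foldl_append] at hL
      simp only [List.foldl] at hL
      obtain ⟨hlen, hz, hval⟩ := ihK (by omega) _ rfl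
      rw [pvListFact ((K : Int) + 1) (by omega) _ _ (by rw [hlen]; push_cast; omega)] at hL
      rw [show ((K : Int) + 1) - 1 = ((K : Nat) : Int) by ring, PySem.List.pyGetD_natCast,
        hval] at hL
      rw [PySem.List.pyGetD_eq_getElem _ _ (by omega) (by rw [hlen]; push_cast; omega)] at hL
      simp only [show ((K : Int) + 1).toNat = K + 1 by omega] at hL
      have hacc := hz (K + 1) (by omega)
      rw [List.getD_eq_getElem?_getD, List.getElem?_eq_getElem (by rw [hlen]; omega)] at hacc
      simp only [Option.getD_some] at hacc
      rw [hacc] at hL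
      have hRB := pvRoundB_eq ((K : Int) + 1) (pvSB K) (by omega)
      rw [show ((K : Int) + 1) - 1 = ((K : Nat) : Int) by ring] at hRB
      rw [← hRB] at hL
      rw [show pvRoundB ((K : Int) + 1) (pvSB K) = pvSB (K + 1) from rfl] at hL
      rw [PySem.List.pySetD_of_nonneg _ _ (by omega)] at hL
      simp only [show ((K : Int) + 1).toNat = K + 1 by omega] at hL
      subst hL
      refine ⟨by rw [List.length_set, hlen], ?_, ?_⟩
      · intro t ht
        rw [List.getD_eq_getElem?_getD, List.getElem?_set_ne (by omega),
          ← List.getD_eq_getElem?_getD]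
        exact hz t (by omega)
      · rw [List.getD_eq_getElem?_getD, List.getElem?_set_self (by rw [hlen]; omega)]
        rfl

-- ===== VERDICT (by name: the statement is the Claim_ definition above) =====
theorem number_of_outcomes_spec : Claim_equal_number_of_outcomes := by
  unfold Claim_equal_number_of_outcomes Spec_number_of_outcomes Pre_number_of_outcomes
  intro n _ hP
  obtain ⟨nN, rfl⟩ : ∃ nN : Nat, n = (nN : Int) := ⟨n.toNat, (Int.toNat_of_nonneg hP).symm⟩
  obtain ⟨hlen, hz, hval⟩ := pvA_outer nN nN (le_refl nN) _ rfl
  simp only [number_of_outcomes, number_of_outcomes_alt]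
  rw [PySem.List.pyGetD_natCast, hval]
  exact (pvAlt_fold nN).symm
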